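-- pv_equiv track=rewrite | github.com/imgomez0127/daily-programming | interview-questions/longestStr.py | longestStrLen
-- ===== SOURCE A (Python) =====
-- def longestStrLen(str1,str2):
-- 	if str1 == "" and str2 == "":
-- 		return 0
-- 	if str1 == "":
-- 		return 1 + longestStrLen(str1,str2[1:])
-- 	if str2 == "":
-- 		return 1 + longestStrLen(str1[1:],str2)
-- 	return 1 + longestStrLen(str1[1:],str2[1:])
-- ===== SOURCE B (Python) =====
-- def longestStrLen(str1, str2):
--     count = 0
--     i = 0
--     j = 0
--     while i < len(str1) or j < len(str2):
--         if i < len(str1):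
--             i += 1
--         if j < len(str2):
--             j += 1
--         count += 1
--     return count
-- ===== Notes on version B (the rewrite author's own statement) =====
-- stated objective: faster
-- what changed: Replaces the double recursion (peeling one character off each non-empty string per call, re-slicing the strings each time) with an iterative loop that advances two index counters simultaneously and counts the passes.
import Mathlib
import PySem

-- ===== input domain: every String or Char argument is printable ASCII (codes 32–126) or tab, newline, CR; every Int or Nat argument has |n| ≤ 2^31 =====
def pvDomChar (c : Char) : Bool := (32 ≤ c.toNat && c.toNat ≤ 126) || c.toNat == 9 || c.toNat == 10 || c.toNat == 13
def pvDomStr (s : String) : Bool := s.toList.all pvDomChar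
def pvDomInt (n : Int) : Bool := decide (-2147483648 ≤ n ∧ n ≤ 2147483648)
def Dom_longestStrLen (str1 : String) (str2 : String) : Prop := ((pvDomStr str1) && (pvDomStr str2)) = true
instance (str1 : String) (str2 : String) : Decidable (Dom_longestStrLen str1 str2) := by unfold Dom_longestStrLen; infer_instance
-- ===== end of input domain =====

-- B replaces A's double recursion by an iterative two-counter loop; return values proved equal.
-- ===== PORT A =====
-- A recurses on the two strings, slicing one character off each non-empty string per call.
def longestStrLenGo : List Char → List Char → Int
  | [], [] => 0
  | [], _ :: bs => 1 + longestStrLenGo [] bs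
  | _ :: as, [] => 1 + longestStrLenGo as []
  | _ :: as, _ :: bs => 1 + longestStrLenGo as bs

def longestStrLen (str1 : String) (str2 : String) : Int :=
  longestStrLenGo str1.toList str2.toList

-- ===== PORT B =====
-- the while loop of Source B, on the remaining lengths (len - i, len - j), with accumulator count
def longestStrLenAltLoop : Nat → Nat → Int → Int
  | 0, 0, count => count
  | n + 1, 0, count => longestStrLenAltLoop n 0 (count + 1)
  | 0, m + 1, count => longestStrLenAltLoop 0 m (count + 1)
  | n + 1, m + 1, count => longestStrLenAltLoop n m (count + 1)

def longestStrLen_alt (str1 : String) (str2 : String) : Int :=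
  longestStrLenAltLoop str1.toList.length str2.toList.length 0

-- ===== PRECONDITION & SPEC =====
def Spec_longestStrLen (str1 : String) (str2 : String) (out : Int) : Prop := out = longestStrLen_alt str1 str2
instance (str1 : String) (str2 : String) (out : Int) : Decidable (Spec_longestStrLen str1 str2 out) := by unfold Spec_longestStrLen; infer_instance

-- ===== CLAIM (what is proved, stated in full; the proofs are below) =====
def Claim_equal_longestStrLen : Prop := ∀ (str1 : String) (str2 : String), Dom_longestStrLen str1 str2 → Spec_longestStrLen str1 str2 (longestStrLen str1 str2)

-- ===== LEMMAS AND PROOFS =====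
theorem longestStrLenGo_eq (as bs : List Char) :
    longestStrLenGo as bs = (max as.length bs.length : Int) := by
  fun_induction longestStrLenGo as bs <;>
    simp_all <;> omega

theorem longestStrLenAltLoop_eq (n m : Nat) (c : Int) :
    longestStrLenAltLoop n m c = c + (max n m : Int) := by
  fun_induction longestStrLenAltLoop n m c <;>
    simp_all <;> omega

-- ===== VERDICT (by name: the statement is the Claim_ definition above) =====
theorem longestStrLen_spec : Claim_equal_longestStrLen := by
  intro s1 s2 _
  unfold Spec_longestStrLen longestStrLen longestStrLen_alt
  rw [longestStrLenGo_eq, longestStrLenAltLoop_eq]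
  omega
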